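-- pv_equiv track=rewrite | github.com/Thiwanka-Sandakalum/VidSage | Apps/gui/core/response_formatter.py | _add_structure_headers
-- ===== SOURCE A (Python) =====
-- def _add_structure_headers(response: str) -> str:
--     """Add structure headers to improve readability"""
--     lines = response.split('\n')
--     formatted_lines = []
--
--     paragraph_count = 0
--
--     for line in lines:
--         stripped = line.strip()
--         if not stripped:
--             formatted_lines.append('')
--             continue
--
--         # Add headers for new paragraphs (simple heuristic)
--         if paragraph_count == 0 and len(stripped) > 50:
--             formatted_lines.append("## Overview\n")
--             paragraph_count += 1
--
--         formatted_lines.append(stripped)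
--
--     return '\n'.join(formatted_lines)
-- ===== SOURCE B (Python) =====
-- def _add_structure_headers(response: str) -> str:
--     """Add structure headers to improve readability"""
--     def go(lines):
--         # recurse over the leading run of short/blank lines; once the first
--         # long paragraph line is reached, emit the header and plainly strip
--         # the remaining lines with no further searching
--         if not lines:
--             return []
--         s = lines[0].strip()
--         if len(s) > 50:
--             return ["## Overview\n", s] + [l.strip() for l in lines[1:]]
--         return [s] + go(lines[1:])
--     return '\n'.join(go(response.split('\n')))
-- ===== Notes on version B (the rewrite author's own statement) =====
-- stated objective: alternative
-- what changed: Replaces A's single accumulator loop with a paragraph-count flag by a recursive decomposition: recursion consumes the leading run of short/blank lines, and at the first long line it emits the header and finishes with a plain strip-map over the untouched remainder (no flag, no further scanning).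
import Mathlib
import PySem

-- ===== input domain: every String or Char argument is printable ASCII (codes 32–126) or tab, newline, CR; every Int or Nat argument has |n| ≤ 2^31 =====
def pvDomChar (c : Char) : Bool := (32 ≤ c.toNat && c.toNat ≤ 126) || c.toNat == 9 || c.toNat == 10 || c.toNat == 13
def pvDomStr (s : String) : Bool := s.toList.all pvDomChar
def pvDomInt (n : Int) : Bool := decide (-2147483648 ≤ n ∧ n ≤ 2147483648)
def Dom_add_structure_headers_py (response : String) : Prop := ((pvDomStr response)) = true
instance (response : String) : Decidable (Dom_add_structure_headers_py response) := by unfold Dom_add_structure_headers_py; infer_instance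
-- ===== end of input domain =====

-- B replaces A's flag-carrying accumulator loop by a recursion that stops searching at the first long line; equivalence proved on all inputs.

-- ===== PORT A =====
-- one loop step of A's for-loop: state is (formatted_lines, paragraph_count)
def aStep (st : List String × Int) (line : String) : List String × Int :=
  let stripped := PySem.Str.strip line
  if stripped = "" then (st.1 ++ [""], st.2)
  else if st.2 = 0 ∧ 50 < PySem.Str.len stripped then
    (st.1 ++ ["## Overview\n", stripped], st.2 + 1)
  else (st.1 ++ [stripped], st.2)

def add_structure_headers_py (response : String) : String :=
  let lines := (PySem.Str.split? response "\n").getD []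
  PySem.Str.join "\n" (lines.foldl aStep ([], 0)).1

-- ===== PORT B =====
-- B's recursive helper 'go': recurse while lines strip short/blank; at the first
-- long line emit the header and strip-map the remainder.
def bGo : List String → List String
  | [] => []
  | l :: ls =>
    let s := PySem.Str.strip l
    if 50 < PySem.Str.len s then "## Overview\n" :: s :: ls.map PySem.Str.strip
    else s :: bGo ls

def add_structure_headers_py_alt (response : String) : String :=
  PySem.Str.join "\n" (bGo ((PySem.Str.split? response "\n").getD []))

-- ===== PRECONDITION & SPEC =====
def Spec_add_structure_headers_py (response : String) (out : String) : Prop := out = add_structure_headers_py_alt response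
instance (response : String) (out : String) : Decidable (Spec_add_structure_headers_py response out) := by unfold Spec_add_structure_headers_py; infer_instance

-- ===== CLAIM (what is proved, stated in full; the proofs are below) =====
def Claim_equal_add_structure_headers_py : Prop := ∀ (response : String), Dom_add_structure_headers_py response → Spec_add_structure_headers_py response (add_structure_headers_py response)

-- ===== LEMMAS AND PROOFS =====

-- A's loop once paragraph_count ≠ 0: it just appends the stripped lines.
lemma aLoop_pos (ls : List String) : ∀ (acc : List String) (c : Int), c ≠ 0 →
    ls.foldl aStep (acc, c) = (acc ++ ls.map PySem.Str.strip, c) := by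
  induction ls with
  | nil => intro acc c _; simp
  | cons l ls ih =>
    intro acc c hc
    by_cases h0 : PySem.Str.strip l = ""
    · simp [aStep, h0, ih _ c hc]
    · simp [aStep, h0, hc, ih _ c hc]

-- A's loop from count 0 produces exactly B's recursion bGo.
lemma aLoop_zero (ls : List String) : ∀ (acc : List String),
    (ls.foldl aStep (acc, 0)).1 = acc ++ bGo ls := by
  induction ls with
  | nil => intro acc; simp [bGo]
  | cons l ls ih =>
    intro acc
    by_cases hlong : 50 < PySem.Str.len (PySem.Str.strip l)
    · have step : aStep (acc, 0) l = (acc ++ ["## Overview\n", PySem.Str.strip l], 1) := by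
        unfold aStep
        dsimp only
        split_ifs with h1 h2
        · rw [h1] at hlong; exact absurd hlong (by decide)
        · norm_num
        · exact absurd ⟨rfl, hlong⟩ h2
      simp only [List.foldl_cons, step]
      rw [aLoop_pos ls _ 1 one_ne_zero]
      simp only [bGo]
      rw [if_pos hlong]
      simp
    · have step : aStep (acc, 0) l = (acc ++ [PySem.Str.strip l], 0) := by
        unfold aStep
        dsimp only
        split_ifs with h1 h2
        · rw [h1]
        · exact absurd h2.2 hlong
        · rfl
      simp only [List.foldl_cons, step]
      rw [ih]
      simp only [bGo]
      rw [if_neg hlong]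
      simp

-- ===== VERDICT (by name: the statement is the Claim_ definition above) =====
theorem add_structure_headers_py_spec : Claim_equal_add_structure_headers_py := by
  intro response _
  unfold Spec_add_structure_headers_py add_structure_headers_py add_structure_headers_py_alt
  simp only
  rw [aLoop_zero _ []]
  simp
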